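-- pv_equiv track=rewrite | github.com/romeshprasad/DE_sim | Jackson_network/convert_data.py | get_full_path
-- ===== SOURCE A (Python) =====
-- def get_full_path(stage_workers, server_config):
--     path = ["0"]
--     current_server = 0
--     for i, num_servers in enumerate(server_config):
--         current_server += num_servers
--         path.append(str(current_server - num_servers + stage_workers[i]))
--     path.append(str(current_server + 1))
--     return "-".join(path)
-- ===== SOURCE B (Python) =====
-- def get_full_path(stage_workers, server_config):
--     # Back-to-front build: take the grand total of servers first, then walk the
--     # zipped configs in reverse, subtracting each stage off the total and
--     # prepending its piece (separator baked in); no "-".join of bare parts.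
--     n = len(server_config)
--     t = sum(server_config)
--     pieces = ["-" + str(t + 1)]
--     for w, s in zip(reversed(stage_workers[:n]), reversed(server_config)):
--         t -= s
--         pieces.append("-" + str(t + w))
--     pieces.append("0")
--     pieces.reverse()
--     return "".join(pieces)
-- ===== Notes on version B (the rewrite author's own statement) =====
-- stated objective: alternative
-- what changed: Replaces A's forward loop that accumulates a running server sum and joins bare parts with '-' by a back-to-front build: compute the grand total first, walk the zipped configs in reverse subtracting each stage, collect pieces with the separator baked in, reverse, and concatenate.
import Mathlib
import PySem

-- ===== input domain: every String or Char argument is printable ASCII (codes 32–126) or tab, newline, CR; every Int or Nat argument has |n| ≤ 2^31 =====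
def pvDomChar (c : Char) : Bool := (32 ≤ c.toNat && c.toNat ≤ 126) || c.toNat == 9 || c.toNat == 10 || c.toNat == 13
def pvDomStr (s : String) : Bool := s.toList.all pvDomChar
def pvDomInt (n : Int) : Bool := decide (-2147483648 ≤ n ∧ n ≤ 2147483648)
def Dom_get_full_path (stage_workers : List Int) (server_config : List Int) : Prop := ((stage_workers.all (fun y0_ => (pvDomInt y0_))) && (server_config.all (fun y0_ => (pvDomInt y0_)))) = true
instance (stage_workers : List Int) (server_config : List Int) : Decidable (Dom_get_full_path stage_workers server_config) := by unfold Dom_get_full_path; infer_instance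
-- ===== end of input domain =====

-- B replaces A's list-building loop + join by a recursion over the zipped
-- configs that concatenates the hyphenated string directly (alternative
-- decomposition, same cost).

-- ===== PORT A =====
-- stage_workers[i]: pyGet? = none is Python's IndexError; Pre_ keeps the index in range,
-- so the `.getD 0` default is never reached on admitted inputs.
def get_full_path (stage_workers : List Int) (server_config : List Int) : String :=
  let st :=
    (PySem.List.enumerate server_config 0).foldl
      (fun (st : List String × Int) (p : Int × Int) =>
        let cur := st.2 + p.2
        (st.1 ++ [PySem.Int.toStr (cur - p.2 + (PySem.List.pyGet? stage_workers p.1).getD 0)], cur))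
      (["0"], 0)
  PySem.Str.join "-" (st.1 ++ [PySem.Int.toStr (st.2 + 1)])

-- ===== PORT B =====
-- Source B: grand total first, then a loop over zip(reversed(sw[:n]), reversed(sc))
-- that subtracts and appends pieces; pieces.reverse(); "".join(pieces).
def get_full_path_alt (stage_workers : List Int) (server_config : List Int) : String :=
  let n := server_config.length
  let t := server_config.sum
  let pieces : List String := ["-" ++ PySem.Int.toStr (t + 1)]
  let st :=
    (((PySem.List.slice stage_workers none (some (n : Int))).reverse).zip
        server_config.reverse).foldl
      (fun (st : List String × Int) (p : Int × Int) =>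
        let t' := st.2 - p.2
        (st.1 ++ ["-" ++ PySem.Int.toStr (t' + p.1)], t'))
      (pieces, t)
  PySem.Str.join "" ((st.1 ++ ["0"]).reverse)

-- ===== PRECONDITION & SPEC =====
-- Pre_ excludes exactly the inputs where Python A raises IndexError
-- (server_config longer than stage_workers).
def Pre_get_full_path (stage_workers : List Int) (server_config : List Int) : Prop :=
  server_config.length ≤ stage_workers.length
instance (stage_workers : List Int) (server_config : List Int) : Decidable (Pre_get_full_path stage_workers server_config) := by unfold Pre_get_full_path; infer_instance
def pvWitness_get_full_path : List Int × List Int := ([1, 2, 3], [4, 5, 6])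

def Spec_get_full_path (stage_workers : List Int) (server_config : List Int) (out : String) : Prop := out = get_full_path_alt stage_workers server_config
instance (stage_workers : List Int) (server_config : List Int) (out : String) : Decidable (Spec_get_full_path stage_workers server_config out) := by unfold Spec_get_full_path; infer_instance

-- ===== CLAIM (what is proved, stated in full; the proofs are below) =====
def Claim_equal_get_full_path : Prop := ∀ (stage_workers : List Int) (server_config : List Int), Dom_get_full_path stage_workers server_config → Pre_get_full_path stage_workers server_config → Spec_get_full_path stage_workers server_config (get_full_path stage_workers server_config)

-- ===== LEMMAS AND PROOFS =====

-- A's loop, fully unrolled: the path accumulates one entry per stage, each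
-- carrying the running sum before that stage plus the stage's worker count.
lemma foldA (sw : List Int) :
    ∀ (sc : List Int) (s : Int) (path : List String) (c : Int),
      (PySem.List.enumerate sc s).foldl
        (fun (st : List String × Int) (p : Int × Int) =>
          let cur := st.2 + p.2
          (st.1 ++ [PySem.Int.toStr (cur - p.2 + (PySem.List.pyGet? sw p.1).getD 0)], cur))
        (path, c)
      = (path ++ (List.range sc.length).map
            (fun i => PySem.Int.toStr (c + (sc.take i).sum + (PySem.List.pyGet? sw (s + i)).getD 0)),
         c + sc.sum) := by
  intro sc
  induction sc with
  | nil => intro s path c; simp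
  | cons x sc ih =>
    intro s path c
    rw [PySem.List.enumerate_cons, List.foldl_cons]
    simp only []
    rw [ih]
    simp only [List.length_cons, List.range_succ_eq_map, List.map_cons, List.map_map,
      List.append_assoc, List.singleton_append, List.sum_cons, Prod.mk.injEq]
    refine ⟨?_, by ring⟩
    congr 1
    simp only [List.cons.injEq]
    constructor
    · have h : s + ((0 : Nat) : Int) = s := by push_cast; ring
      rw [h]
      congr 1
      simp
    · apply List.map_congr_left
      intro j _
      simp only [Function.comp, List.take_succ_cons, List.sum_cons]
      have h : s + ((j + 1 : Nat) : Int) = s + 1 + (j : Int) := by push_cast; ring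
      rw [h]
      congr 1
      ring

-- "".join of (a :: l) splits off its head.
lemma joinE (a : List Char) (l : List (List Char)) :
    PySem.Chars.join [] (a :: l) = a ++ PySem.Chars.join [] l := by
  cases l with
  | nil => simp [PySem.Chars.join_singleton]
  | cons b l => rw [PySem.Chars.join_cons_cons]; simp

-- "-".join of bare parts = "".join of the same parts with "-" baked into each tail piece.
lemma joinDashEmpty (l : List String) : ∀ (x : String),
    PySem.Str.join "-" (x :: l) = PySem.Str.join "" (x :: l.map (fun p => "-" ++ p)) := by
  induction l with
  | nil => intro x; apply String.toList_inj.mp; simp [PySem.Str.join]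
  | cons y l ih =>
    intro x
    apply String.toList_inj.mp
    have h := congrArg String.toList (ih y)
    simp only [PySem.Str.join, List.map_cons, String.toList_append, String.toList_ofList] at h ⊢
    simp only [show ("" : String).toList = [] from rfl,
      show ("-" : String).toList = ['-'] from rfl] at h ⊢
    rw [joinE] at h
    rw [PySem.Chars.join_cons_cons, PySem.Chars.join_cons_cons, joinE]
    simp [h]

-- B's reversed loop as a foldr, fully unrolled: each pair contributes a piece
-- carrying the total minus everything from its stage on, plus its worker count.
lemma foldB (sc : List Int) :
    ∀ (sw : List Int) (t : Int) (init : List String), sw.length = sc.length →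
      (sw.zip sc).foldr
        (fun p (st : List String × Int) =>
          (st.1 ++ ["-" ++ PySem.Int.toStr ((st.2 - p.2) + p.1)], st.2 - p.2))
        (init, t)
      = (init ++ ((List.range sc.length).map
            (fun i => "-" ++ PySem.Int.toStr (t - sc.sum + (sc.take i).sum + sw[i]?.getD 0))).reverse,
         t - sc.sum) := by
  induction sc with
  | nil =>
    intro sw t init h
    rw [List.length_eq_zero_iff.mp h]
    simp
  | cons v sc ih =>
    intro sw t init h
    cases sw with
    | nil => simp at h
    | cons w sw =>
      simp only [List.zip_cons_cons, List.foldr_cons]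
      rw [ih sw t init (by simpa using h)]
      simp only [List.length_cons, List.range_succ_eq_map, List.map_cons, List.map_map,
        List.sum_cons, List.reverse_cons, Prod.mk.injEq]
      have hmap : List.map
            ((fun i => "-" ++ PySem.Int.toStr (t - (v + sc.sum) + (List.take i (v :: sc)).sum +
                (w :: sw)[i]?.getD 0)) ∘ Nat.succ) (List.range sc.length)
          = List.map (fun i => "-" ++ PySem.Int.toStr (t - sc.sum + (List.take i sc).sum +
                sw[i]?.getD 0)) (List.range sc.length) := by
        apply List.map_congr_left
        intro j _
        simp only [Function.comp, List.take_succ_cons, List.sum_cons, List.getElem?_cons_succ]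
        congr 2
        ring
      refine ⟨?_, by ring⟩
      rw [List.append_assoc, hmap]
      congr 2
      simp only [List.take_zero, List.sum_nil, List.getElem?_cons_zero, Option.getD_some]
      congr 2
      ring

-- ===== VERDICT (by name: the statement is the Claim_ definition above) =====
theorem get_full_path_spec : Claim_equal_get_full_path := by
  intro sw sc _ hpre
  unfold Spec_get_full_path get_full_path get_full_path_alt
  rw [foldA sw sc 0]
  simp only [List.cons_append]
  rw [joinDashEmpty _ "0"]
  have hsl : PySem.List.slice sw none (some ((sc.length : Nat) : Int)) = sw.take sc.length := by
    simp [PySem.List.slice_to_natCast]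
  rw [hsl]
  have hlen : (sw.take sc.length).length = sc.length := by
    simp [List.length_take, Nat.min_eq_left hpre]
  rw [show ((sw.take sc.length).reverse.zip sc.reverse)
        = ((sw.take sc.length).zip sc).reverse from by
      simp [List.zip_eq_zipWith, List.reverse_zipWith hlen]]
  rw [List.foldl_reverse]
  rw [foldB sc (sw.take sc.length) sc.sum _ hlen]
  simp only [List.reverse_append, List.reverse_reverse, List.reverse_cons, List.reverse_nil,
    List.nil_append, List.cons_append, List.map_append, List.map_cons,
    List.map_nil]
  congr 2
  rw [List.map_map]
  congr 1
  · apply List.map_congr_left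
    intro i hi
    have hi' : i < sc.length := List.mem_range.mp hi
    simp only [Function.comp]
    rw [show ((0 : Int) + (i : Int)) = ((i : Nat) : Int) from by ring, PySem.List.pyGet?_natCast,
      List.getElem?_take_of_lt hi']
    congr 2
    ring
  · simp only [List.cons.injEq, and_true]
    congr 2
    ring
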